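-- pv_equiv track=rewrite | github.com/philippeitis/SkolemSolver | skolempy/fasterskolem.py | skolem_gen
-- ===== SOURCE A (Python) =====
-- def skolem_gen(numpair, k):
--     # generates an empty array of false values, so that we can populate it with the skolem pairings
--     ls = 2 * k
--     skolem = [0] * ls
--     first_empty = 0
--
--     # this goes over each number and places it into the first empty spot
--     for i in numpair:
--         for n in range(first_empty, ls - i):
--             # if the first value is empty, place an object in there (this assumes that the generator
--             # has a valid skolem sequence
--             if not skolem[n]:
--                 if skolem[n + i]:
--                     return
--                 first_empty = n + 1
--                 skolem[n] = i
--                 skolem[n + i] = i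
--                 break
--         else:
--             return
--     # if any value is false, this is not a valid skolem sequence, so we can discard it. otherwise,
--     # we can return a valid sequence
--     return skolem
-- ===== SOURCE B (Python) =====
-- def skolem_gen(numpair, k):
--     # Union-find "next-free-slot" structure: nxt[j] points toward the first
--     # unoccupied slot >= j (slot L = max(ls, 0) is a sentinel root); find does
--     # path compression.  A slot is free iff it is its own root, so the first
--     # empty slot and the partner-occupancy test are both answered by find().
--     ls = 2 * k
--     L = max(ls, 0)
--     nxt = list(range(L + 1))
--
--     def find(j):
--         root = j
--         while nxt[root] != root:
--             root = nxt[root]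
--         while nxt[j] != root:
--             nxt[j], j = root, nxt[j]
--         return root
--
--     skolem = [0] * ls
--     for i in numpair:
--         n = find(0)
--         if not (0 <= n + i < ls):
--             return None
--         if find(n + i) != n + i:
--             return None
--         skolem[n] = i
--         skolem[n + i] = i
--         nxt[n] = n + 1
--         nxt[n + i] = n + i + 1
--     return skolem
-- ===== Notes on version B (the rewrite author's own statement) =====
-- stated objective: alternative
-- what changed: B replaces A's linear rescans of a preallocated array by a union-find next-free-slot structure (nxt pointers with path compression): the first empty slot and the partner-occupancy test are both answered by find(), and placement unions a slot with its successor; A's rescans are already amortized linear, so no asymptotic gain is claimed.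
-- outside the precondition, e.g. on skolem_gen([-1], 1): A returns [-1, -1], B returns None; on skolem_gen([-3], 1): A raises IndexError, B returns None
import Mathlib
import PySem

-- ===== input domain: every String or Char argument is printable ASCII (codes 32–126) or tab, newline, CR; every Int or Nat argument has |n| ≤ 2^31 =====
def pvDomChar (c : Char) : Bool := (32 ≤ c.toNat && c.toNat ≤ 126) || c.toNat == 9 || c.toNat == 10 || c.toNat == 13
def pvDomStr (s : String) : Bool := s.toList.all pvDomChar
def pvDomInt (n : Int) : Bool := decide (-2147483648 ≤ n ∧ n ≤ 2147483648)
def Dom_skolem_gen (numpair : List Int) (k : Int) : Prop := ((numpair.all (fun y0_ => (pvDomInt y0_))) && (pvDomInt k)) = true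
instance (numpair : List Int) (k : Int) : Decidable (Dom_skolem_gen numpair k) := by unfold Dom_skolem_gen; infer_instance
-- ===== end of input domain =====

-- B replaces A's linear rescans of a preallocated array by a union-find
-- next-free-slot structure (path-compressed nxt pointers); an alternative
-- algorithm, no speed claim.

-- ===== PORT A =====
-- inner 'for n in range(first_empty, ls - i)' with break/else; returns the updated
-- (skolem, first_empty) on break, none on the 'else: return' / 'return' exits.
-- The IndexError arms also yield none; they are unreachable inside Pre_, where every
-- read index is in range (pySetD is exact there for the same reason).
def skolemA_inner (skolem : List Int) (i : Int) : List Int → Option (List Int × Int)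
  | [] => none
  | n :: rest =>
    match PySem.List.pyGet? skolem n with
    | none => none
    | some v =>
      if v = 0 then
        match PySem.List.pyGet? skolem (n + i) with
        | none => none
        | some w =>
          if w ≠ 0 then none
          else some (PySem.List.pySetD (PySem.List.pySetD skolem n i) (n + i) i, n + 1)
      else skolemA_inner skolem i rest

-- 'for i in numpair' carrying (skolem, first_empty)
def skolemA_loop (ls : Int) (skolem : List Int) (fe : Int) : List Int → Option (List Int)
  | [] => some skolem
  | i :: rest =>
    match skolemA_inner skolem i (PySem.List.pyRange fe (ls - i) 1) with
    | none => none
    | some (sk, fe') => skolemA_loop ls sk fe' rest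

def skolem_gen (numpair : List Int) (k : Int) : Option (List Int) :=
  let ls := 2 * k
  skolemA_loop ls (List.replicate ls.toNat 0) 0 numpair

-- ===== PORT B =====
-- 'root = j; while nxt[root] != root: root = nxt[root]' — the fuel (= len(nxt), an
-- upper bound on the strictly increasing pointer chain) only makes the loop total;
-- the out-of-range arm is unreachable on inputs the proofs cover.
def ufRoot : Nat → List Int → Int → Int
  | 0, _, root => root
  | fuel + 1, nxt, root =>
    match PySem.List.pyGet? nxt root with
    | some v => if v ≠ root then ufRoot fuel nxt v else root
    | none => root

-- 'while nxt[j] != root: nxt[j], j = root, nxt[j]' (path compression), same fuel note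
def ufCompress : Nat → List Int → Int → Int → List Int
  | 0, nxt, _, _ => nxt
  | fuel + 1, nxt, j, root =>
    match PySem.List.pyGet? nxt j with
    | some v =>
      if v ≠ root then ufCompress fuel (PySem.List.pySetD nxt j root) v root else nxt
    | none => nxt

-- 'def find(j)': returns the root and the compressed nxt array
def ufFind (nxt : List Int) (j : Int) : Int × List Int :=
  let root := ufRoot nxt.length nxt j
  (root, ufCompress nxt.length nxt j root)

-- 'for i in numpair' over (nxt, skolem)
def skolemB_loop (ls : Int) (nxt skolem : List Int) : List Int → Option (List Int)
  | [] => some skolem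
  | i :: rest =>
    let f1 := ufFind nxt 0
    let n := f1.1
    if ¬(0 ≤ n + i ∧ n + i < ls) then none
    else
      let f2 := ufFind f1.2 (n + i)
      if f2.1 ≠ n + i then none
      else
        skolemB_loop ls
          (PySem.List.pySetD (PySem.List.pySetD f2.2 n (n + 1)) (n + i) (n + i + 1))
          (PySem.List.pySetD (PySem.List.pySetD skolem n i) (n + i) i)
          rest

def skolem_gen_alt (numpair : List Int) (k : Int) : Option (List Int) :=
  let ls := 2 * k
  let L := max ls 0
  skolemB_loop ls (PySem.List.pyRange 0 (L + 1) 1) (List.replicate ls.toNat 0) numpair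

-- ===== PRECONDITION & SPEC =====
-- Pre_ restricts to the task's natural domain, pair lengths ≥ 0: on negative entries A
-- either raises IndexError or reads through Python's negative-index wraparound, an
-- accident of A's indexing that no Skolem-sequence input reaches.
def Pre_skolem_gen (numpair : List Int) (k : Int) : Prop := ∀ i ∈ numpair, 0 ≤ i
instance (numpair : List Int) (k : Int) : Decidable (Pre_skolem_gen numpair k) := by
  unfold Pre_skolem_gen; infer_instance

def pvWitness_skolem_gen : List Int × Int := ([4, 2, 3, 1], 4)

def Spec_skolem_gen (numpair : List Int) (k : Int) (out : Option (List Int)) : Prop := out = skolem_gen_alt numpair k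
instance (numpair : List Int) (k : Int) (out : Option (List Int)) : Decidable (Spec_skolem_gen numpair k out) := by unfold Spec_skolem_gen; infer_instance

-- ===== CLAIM (what is proved, stated in full; the proofs are below) =====
def Claim_equal_skolem_gen : Prop := ∀ (numpair : List Int) (k : Int), Dom_skolem_gen numpair k → Pre_skolem_gen numpair k → Spec_skolem_gen numpair k (skolem_gen numpair k)

-- ===== LEMMAS AND PROOFS =====

-- proof-side model: the dict of placements and a forward pointer; A's array is its
-- rendering, B's union-find locates the same slots

def pvRender (ls : Int) (placed : PySem.Dict Int Int) : List Int :=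
  (PySem.List.pyRange 0 ls 1).map (fun j => placed.getD j 0)

-- first slot p ≥ ptr with p ≥ ls or p unplaced
def pvAdv (placed : PySem.Dict Int Int) (ls ptr : Int) : Int :=
  if h : ptr < ls ∧ placed.contains ptr = true then pvAdv placed ls (ptr + 1) else ptr
termination_by (ls - ptr).toNat
decreasing_by omega

def pvPtrLoop (ls : Int) (placed : PySem.Dict Int Int) (ptr : Int) :
    List Int → Option (PySem.Dict Int Int)
  | [] => some placed
  | i :: rest =>
    let p := pvAdv placed ls ptr
    if ls ≤ p + i then none
    else if placed.contains (p + i) then none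
    else pvPtrLoop ls ((placed.insert p i).insert (p + i) i) (p + 1) rest

lemma pvRender_get (ls n : Int) (placed : PySem.Dict Int Int) (h0 : 0 ≤ n) (h1 : n < ls) :
    PySem.List.pyGet? (pvRender ls placed) n = some (placed.getD n 0) := by
  rw [pvRender, PySem.List.pyGet?_of_nonneg _ h0]
  have hk : n.toNat < (ls - 0).toNat := by omega
  rw [List.getElem?_map, List.getElem?_eq_getElem (by simpa using hk)]
  rw [PySem.List.getElem_pyRange_one]
  have : (0 : Int) + (n.toNat : Int) = n := by omega
  rw [this]
  rfl

lemma pvRender_set (ls a v : Int) (placed : PySem.Dict Int Int)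
    (ha : 0 ≤ a) (_hal : a < ls) :
    PySem.List.pySetD (pvRender ls placed) a v = pvRender ls (placed.insert a v) := by
  rw [PySem.List.pySetD_of_nonneg _ _ ha]
  apply List.ext_getElem
  · simp [pvRender]
  · intro m h1 h2
    have hm : m < (ls - 0).toNat := by
      simpa [pvRender, PySem.List.pyRange_one] using h2
    rw [List.getElem_set]
    simp only [pvRender, List.getElem_map, PySem.List.getElem_pyRange_one,
      PySem.Dict.getD_insert]
    by_cases hme : a.toNat = m
    · rw [if_pos hme, if_pos (by omega)]
    · rw [if_neg hme, if_neg (by omega)]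

lemma pvAdv_ge (placed : PySem.Dict Int Int) (ls ptr : Int) :
    ptr ≤ pvAdv placed ls ptr := by
  unfold pvAdv
  split
  · have := pvAdv_ge placed ls (ptr + 1); omega
  · omega
termination_by (ls - ptr).toNat
decreasing_by omega

-- A's inner scan, started at ptr over the rendered array, computes exactly what the
-- pointer model computes from pvAdv plus the bound/partner checks and the two inserts
lemma pv_inner_eq (placed : PySem.Dict Int Int) (ls i : Int) (hi : 0 ≤ i)
    (ptr : Int) (hptr : 0 ≤ ptr)
    (hinv : ∀ j, placed.contains j = true → ptr ≤ j → placed.getD j 0 ≠ 0) :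
    skolemA_inner (pvRender ls placed) i (PySem.List.pyRange ptr (ls - i) 1) =
      (let p := pvAdv placed ls ptr
       if ls ≤ p + i then none
       else if placed.contains (p + i) = true then none
       else some (pvRender ls ((placed.insert p i).insert (p + i) i), p + 1)) := by
  rw [pvAdv]
  by_cases hc : ptr < ls ∧ placed.contains ptr = true
  · rw [dif_pos hc]
    have hrec := pv_inner_eq placed ls i hi (ptr + 1) (by omega)
      (fun j hj hj2 => hinv j hj (by omega))
    by_cases hlt : ptr < ls - i
    · rw [PySem.List.pyRange_one_cons hlt]
      have hg : PySem.List.pyGet? (pvRender ls placed) ptr = some (placed.getD ptr 0) :=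
        pvRender_get ls ptr placed hptr (by omega)
      have hne : placed.getD ptr 0 ≠ 0 := hinv ptr hc.2 le_rfl
      simp only [skolemA_inner, hg, if_neg hne]
      exact hrec
    · have hz : (ls - i - ptr).toNat = 0 := by omega
      have hp := pvAdv_ge placed ls (ptr + 1)
      rw [PySem.List.pyRange_one, hz]
      simp only [List.range_zero, List.map_nil, skolemA_inner]
      rw [if_pos (by omega)]
  · rw [dif_neg hc]
    by_cases hge : ls ≤ ptr + i
    · have hz : (ls - i - ptr).toNat = 0 := by omega
      rw [PySem.List.pyRange_one, hz]
      simp only [List.range_zero, List.map_nil, skolemA_inner]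
      rw [if_pos hge]
    · have hlt : ptr < ls - i := by omega
      have hpl : ptr < ls := by omega
      have hnc : placed.contains ptr = false := by
        simp only [not_and, Bool.not_eq_true] at hc
        exact hc hpl
      rw [PySem.List.pyRange_one_cons hlt]
      have hg : PySem.List.pyGet? (pvRender ls placed) ptr = some (placed.getD ptr 0) :=
        pvRender_get ls ptr placed hptr (by omega)
      have hg0 : placed.getD ptr 0 = 0 := PySem.Dict.getD_of_not_contains placed 0 hnc
      have hg2 : PySem.List.pyGet? (pvRender ls placed) (ptr + i) =
          some (placed.getD (ptr + i) 0) :=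
        pvRender_get ls (ptr + i) placed (by omega) (by omega)
      simp only [skolemA_inner, hg, hg2]
      rw [if_pos hg0, if_neg hge]
      by_cases hc2 : placed.contains (ptr + i) = true
      · have : placed.getD (ptr + i) 0 ≠ 0 := hinv _ hc2 (by omega)
        rw [if_pos this, if_pos hc2]
      · have hnc2 : placed.contains (ptr + i) = false := by
          simp only [Bool.not_eq_true] at hc2
          exact hc2
        have : placed.getD (ptr + i) 0 = 0 := PySem.Dict.getD_of_not_contains placed 0 hnc2
        rw [if_neg (by simp [this]), if_neg hc2]
        rw [pvRender_set ls ptr i placed hptr hpl,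
          pvRender_set ls (ptr + i) i _ (by omega) (by omega)]
termination_by (ls - ptr).toNat
decreasing_by omega

lemma pv_a_loop_eq (ls : Int) :
    ∀ (np : List Int), (∀ i ∈ np, 0 ≤ i) →
    ∀ (placed : PySem.Dict Int Int) (fe : Int), 0 ≤ fe →
    (∀ j, placed.contains j = true → fe ≤ j → placed.getD j 0 ≠ 0) →
    skolemA_loop ls (pvRender ls placed) fe np =
      (pvPtrLoop ls placed fe np).map (pvRender ls) := by
  intro np
  induction np with
  | nil => intro _ placed fe _ _; rfl
  | cons i rest ih =>
    intro hnp placed fe hfe hinv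
    have hi : 0 ≤ i := hnp i List.mem_cons_self
    have hrest : ∀ x ∈ rest, 0 ≤ x := fun x hx => hnp x (List.mem_cons_of_mem _ hx)
    have hp := pvAdv_ge placed ls fe
    rw [skolemA_loop, pvPtrLoop, pv_inner_eq placed ls i hi fe hfe hinv]
    by_cases h1 : ls ≤ pvAdv placed ls fe + i
    · rw [if_pos h1, if_pos h1]; rfl
    · rw [if_neg h1, if_neg h1]
      by_cases h2 : placed.contains (pvAdv placed ls fe + i) = true
      · rw [if_pos h2, if_pos h2]; rfl
      · simp only [Bool.not_eq_true] at h2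
        rw [if_neg (by simp [h2]), if_neg (by simp [h2])]
        exact ih hrest _ _ (by omega) (by
          intro j hj hj2
          set p := pvAdv placed ls fe with hpdef
          rw [PySem.Dict.getD_insert]
          by_cases hji : j = p + i
          · have : 0 < i := by omega
            rw [if_pos hji]; omega
          · rw [if_neg hji, PySem.Dict.getD_insert, if_neg (by omega)]
            rw [PySem.Dict.contains_insert, PySem.Dict.contains_insert] at hj
            simp only [Bool.or_eq_true, beq_iff_eq] at hj
            rcases hj with hcase | hcase | hcase
            · exact absurd hcase hji
            · exact absurd hcase (by omega)
            · exact hinv j hcase (by omega))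

lemma pvRender_empty (ls : Int) :
    pvRender ls PySem.Dict.empty = List.replicate ls.toNat 0 := by
  apply List.ext_getElem
  · simp [pvRender, PySem.List.pyRange_one]
  · intro m h1 h2
    simp [pvRender, PySem.Dict.getD_empty]

-- ====== union-find side ======

-- the invariant tying B's nxt array to the placement dict: each pointer moves forward,
-- only skips placed slots, stays put on a free slot, and moves off a placed one
def pvInv (nxt : List Int) (placed : PySem.Dict Int Int) (ls : Int) : Prop :=
  nxt.length = (max ls 0 + 1).toNat ∧
  ∀ j v : Int, 0 ≤ j → j ≤ max ls 0 → PySem.List.pyGet? nxt j = some v →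
    j ≤ v ∧ v ≤ max ls 0 ∧
    (∀ m, j ≤ m → m < v → placed.contains m = true) ∧
    (j < max ls 0 → placed.contains j = false → v = j) ∧
    (j < max ls 0 → placed.contains j = true → j < v)

lemma pvInv_get (nxt : List Int) (placed : PySem.Dict Int Int) (ls : Int)
    (hInv : pvInv nxt placed ls) (j : Int) (h0 : 0 ≤ j) (h1 : j ≤ max ls 0) :
    ∃ v, PySem.List.pyGet? nxt j = some v := by
  have hlen := hInv.1
  have hj : j.toNat < nxt.length := by omega
  rw [PySem.List.pyGet?_of_nonneg _ h0, List.getElem?_eq_getElem hj]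
  exact ⟨_, rfl⟩

lemma pvGet_setD (xs : List Int) (a b v : Int) (ha : 0 ≤ a) (hb : 0 ≤ b)
    (hal : a.toNat < xs.length) :
    PySem.List.pyGet? (PySem.List.pySetD xs a v) b =
      if b = a then some v else PySem.List.pyGet? xs b := by
  rw [PySem.List.pySetD_of_nonneg _ _ ha, PySem.List.pyGet?_of_nonneg _ hb,
    PySem.List.pyGet?_of_nonneg _ hb, List.getElem?_set]
  by_cases h : b = a
  · rw [if_pos (by omega), if_pos h, if_pos (by omega)]
  · rw [if_neg (by omega), if_neg h]

lemma pvAdv_le (placed : PySem.Dict Int Int) (ls j : Int) (h : j ≤ max ls 0) :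
    pvAdv placed ls j ≤ max ls 0 := by
  unfold pvAdv
  split
  · exact pvAdv_le placed ls (j + 1) (by omega)
  · exact h
termination_by (ls - j).toNat
decreasing_by omega

lemma pvAdv_prefix (placed : PySem.Dict Int Int) (ls j : Int) :
    ∀ m, j ≤ m → m < pvAdv placed ls j → m < ls ∧ placed.contains m = true := by
  intro m hm1 hm2
  rw [pvAdv] at hm2
  by_cases hc : j < ls ∧ placed.contains j = true
  · rw [dif_pos hc] at hm2
    by_cases hmj : m = j
    · exact ⟨by omega, by rw [hmj]; exact hc.2⟩
    · exact pvAdv_prefix placed ls (j + 1) m (by omega) hm2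
  · rw [dif_neg hc] at hm2
    omega
termination_by (ls - j).toNat
decreasing_by omega

lemma pvAdv_skip (placed : PySem.Dict Int Int) (ls : Int) (a b : Int) (hab : a ≤ b)
    (h : ∀ m, a ≤ m → m < b → m < ls ∧ placed.contains m = true) :
    pvAdv placed ls a = pvAdv placed ls b := by
  by_cases heq : a = b
  · rw [heq]
  · have ha := h a le_rfl (by omega)
    rw [pvAdv, dif_pos ⟨ha.1, ha.2⟩]
    exact pvAdv_skip placed ls (a + 1) b (by omega) (fun m h1 h2 => h m (by omega) h2)
termination_by (b - a).toNat
decreasing_by omega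

-- 'while nxt[root] != root' computes the first free slot, i.e. pvAdv
lemma pvRoot_eq (placed : PySem.Dict Int Int) (ls : Int) :
    ∀ (fuel : Nat) (nxt : List Int) (j : Int), pvInv nxt placed ls →
    0 ≤ j → j ≤ max ls 0 → (max ls 0 - j).toNat < fuel →
    ufRoot fuel nxt j = pvAdv placed ls j := by
  intro fuel
  induction fuel with
  | zero => intro _ _ _ _ _ h; omega
  | succ f ih =>
    intro nxt j hInv h0 h1 hfuel
    obtain ⟨v, hv⟩ := pvInv_get nxt placed ls hInv j h0 h1
    obtain ⟨hjv, hvL, hseg, hfree, hocc⟩ := hInv.2 j v h0 h1 hv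
    rw [ufRoot, hv]
    show (if v ≠ j then ufRoot f nxt v else j) = pvAdv placed ls j
    by_cases hvj : v = j
    · rw [if_neg (by simp [hvj])]
      rw [pvAdv]
      by_cases hc : j < ls ∧ placed.contains j = true
      · have : j < max ls 0 := by omega
        have := hocc this hc.2
        omega
      · rw [dif_neg hc]
    · rw [if_pos hvj]
      have hjlt : j < v := by omega
      -- j must be a placed slot strictly below the sentinel
      have hjmax : j < max ls 0 := by omega
      have hcj : placed.contains j = true := by
        by_cases hc : placed.contains j = true
        · exact hc
        · have := hfree hjmax (by simpa using hc); omega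
      have hls : max ls 0 = ls := by omega
      have hstep : pvAdv placed ls j = pvAdv placed ls v :=
        pvAdv_skip placed ls j v (by omega)
          (fun m h1' h2' => ⟨by omega, hseg m h1' h2'⟩)
      rw [hstep]
      exact ih nxt v hInv (by omega) hvL (by omega)

-- path compression preserves the invariant
lemma pvCompress_inv (placed : PySem.Dict Int Int) (ls : Int) :
    ∀ (fuel : Nat) (nxt : List Int) (j : Int), pvInv nxt placed ls →
    0 ≤ j → j ≤ max ls 0 → (max ls 0 - j).toNat < fuel →
    pvInv (ufCompress fuel nxt j (pvAdv placed ls j)) placed ls := by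
  intro fuel
  induction fuel with
  | zero => intro _ _ _ _ _ h; omega
  | succ f ih =>
    intro nxt j hInv h0 h1 hfuel
    obtain ⟨v, hv⟩ := pvInv_get nxt placed ls hInv j h0 h1
    obtain ⟨hjv, hvL, hseg, hfree, hocc⟩ := hInv.2 j v h0 h1 hv
    rw [ufCompress, hv]
    show pvInv (if v ≠ pvAdv placed ls j then
        ufCompress f (PySem.List.pySetD nxt j (pvAdv placed ls j)) v (pvAdv placed ls j)
      else nxt) placed ls
    by_cases hvr : v = pvAdv placed ls j
    · rw [if_neg (by simp [hvr])]
      exact hInv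
    · rw [if_pos hvr]
      -- as in pvRoot_eq: j is placed and strictly below the sentinel
      have hvj : v ≠ j := by
        intro h
        apply hvr
        rw [h, pvAdv]
        by_cases hc : j < ls ∧ placed.contains j = true
        · have := hocc (by omega) hc.2; omega
        · rw [dif_neg hc]
      have hjmax : j < max ls 0 := by
        by_cases h : j < max ls 0
        · exact h
        · exfalso; apply hvj; omega
      have hcj : placed.contains j = true := by
        by_cases hc : placed.contains j = true
        · exact hc
        · have := hfree hjmax (by simpa using hc); omega
      have hjlt : j < v := hocc hjmax hcj
      have hls : max ls 0 = ls := by omega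
      have hstep : pvAdv placed ls j = pvAdv placed ls v :=
        pvAdv_skip placed ls j v (by omega)
          (fun m h1' h2' => ⟨by omega, hseg m h1' h2'⟩)
      have hroot_ge := pvAdv_ge placed ls j
      have hroot_le := pvAdv_le placed ls j h1
      -- the rewritten array still satisfies the invariant
      have hInv' : pvInv (PySem.List.pySetD nxt j (pvAdv placed ls j)) placed ls := by
        constructor
        · rw [PySem.List.pySetD_of_nonneg _ _ h0, List.length_set]; exact hInv.1
        · intro j' v' h0' h1' hv'
          rw [pvGet_setD nxt j j' _ h0 h0' (by have := hInv.1; omega)] at hv'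
          by_cases hjj : j' = j
          · rw [if_pos hjj] at hv'
            have hv'' : v' = pvAdv placed ls j := by injection hv'; omega
            subst hjj
            refine ⟨by omega, by omega, ?_, ?_, ?_⟩
            · intro m hm1 hm2
              exact (pvAdv_prefix placed ls j' m hm1 (by omega)).2
            · intro _ hcf; rw [hcf] at hcj; cases hcj
            · intro _ _
              have : j' + 1 ≤ pvAdv placed ls (j' + 1) := pvAdv_ge placed ls (j' + 1)
              rw [pvAdv, dif_pos ⟨by omega, hcj⟩] at hv''
              omega
          · rw [if_neg hjj] at hv'
            exact hInv.2 j' v' h0' h1' hv'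
      rw [hstep] at hInv' ⊢
      exact ih _ v hInv' (by omega) (by omega) (by omega)

-- B's loop equals the pointer-model loop, rendered
lemma pv_b_loop_eq (ls : Int) :
    ∀ (np : List Int), (∀ i ∈ np, 0 ≤ i) →
    ∀ (placed : PySem.Dict Int Int) (nxt : List Int) (ptr : Int),
    pvInv nxt placed ls → 0 ≤ ptr → ptr ≤ max ls 0 →
    (∀ m, 0 ≤ m → m < ptr → placed.contains m = true) →
    skolemB_loop ls nxt (pvRender ls placed) np =
      (pvPtrLoop ls placed ptr np).map (pvRender ls) := by
  intro np
  induction np with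
  | nil => intro _ placed nxt ptr _ _ _ _; rfl
  | cons i rest ih =>
    intro hnp placed nxt ptr hInv hptr0 hptrL hpre
    have hi : 0 ≤ i := hnp i List.mem_cons_self
    have hrest : ∀ x ∈ rest, 0 ≤ x := fun x hx => hnp x (List.mem_cons_of_mem _ hx)
    have hlen : nxt.length = (max ls 0 + 1).toNat := hInv.1
    have hfuel0 : (max ls 0 - 0).toNat < nxt.length := by omega
    have hadv0 : pvAdv placed ls 0 = pvAdv placed ls ptr :=
      pvAdv_skip placed ls 0 ptr hptr0
        (fun m h1 h2 => ⟨by omega, hpre m h1 h2⟩)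
    have hn : (ufFind nxt 0).1 = pvAdv placed ls ptr := by
      show ufRoot nxt.length nxt 0 = _
      rw [pvRoot_eq placed ls nxt.length nxt 0 hInv le_rfl (by omega) hfuel0, hadv0]
    set p := pvAdv placed ls ptr with hpdef
    have hpge : ptr ≤ p := pvAdv_ge placed ls ptr
    have hple : p ≤ max ls 0 := pvAdv_le placed ls ptr hptrL
    rw [skolemB_loop, pvPtrLoop]
    simp only [hn, ← hpdef]
    by_cases h1 : ls ≤ p + i
    · rw [if_pos (by omega), if_pos h1]; rfl
    · rw [if_neg (by omega), if_neg h1]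
      have hpi0 : 0 ≤ p + i := by omega
      have hpil : p + i < ls := by omega
      have hInv1 : pvInv (ufFind nxt 0).2 placed ls := by
        show pvInv (ufCompress nxt.length nxt 0 (ufRoot nxt.length nxt 0)) placed ls
        rw [pvRoot_eq placed ls nxt.length nxt 0 hInv le_rfl (by omega) hfuel0]
        exact pvCompress_inv placed ls nxt.length nxt 0 hInv le_rfl (by omega) hfuel0
      have hlen1 : (ufFind nxt 0).2.length = (max ls 0 + 1).toNat := hInv1.1
      have hfuel2 : (max ls 0 - (p + i)).toNat < (ufFind nxt 0).2.length := by omega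
      have hf2 : (ufFind (ufFind nxt 0).2 (p + i)).1 = pvAdv placed ls (p + i) := by
        show ufRoot (ufFind nxt 0).2.length (ufFind nxt 0).2 (p + i) = _
        exact pvRoot_eq placed ls _ _ (p + i) hInv1 hpi0 (by omega) hfuel2
      rw [hf2]
      by_cases h2 : placed.contains (p + i) = true
      · have : pvAdv placed ls (p + i) ≠ p + i := by
          rw [pvAdv, dif_pos ⟨hpil, h2⟩]
          have := pvAdv_ge placed ls (p + i + 1); omega
        rw [if_pos this, if_pos h2]; rfl
      · have h2' : placed.contains (p + i) = false := by simpa using h2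
        have hself : pvAdv placed ls (p + i) = p + i := by
          rw [pvAdv, dif_neg (by simp [h2'])]
        rw [if_neg (by simp [hself]), if_neg (by simp [h2'])]
        -- placement: update dict, skolem rendering and nxt in lock step
        set placed' := (placed.insert p i).insert (p + i) i with hpl'
        have hcontains' : ∀ m, placed'.contains m =
            (m == p + i || (m == p || placed.contains m)) := by
          intro m
          rw [hpl', PySem.Dict.contains_insert, PySem.Dict.contains_insert]
        have hpltls : p < ls := by omega
        have hrender : PySem.List.pySetD
            (PySem.List.pySetD (pvRender ls placed) p i) (p + i) i =
            pvRender ls placed' := by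
          rw [pvRender_set ls p i placed (by omega) hpltls,
            pvRender_set ls (p + i) i _ hpi0 hpil]
        have hInv2 : pvInv (ufFind (ufFind nxt 0).2 (p + i)).2 placed ls := by
          show pvInv (ufCompress (ufFind nxt 0).2.length (ufFind nxt 0).2 (p + i)
            (ufRoot (ufFind nxt 0).2.length (ufFind nxt 0).2 (p + i))) placed ls
          rw [pvRoot_eq placed ls _ _ (p + i) hInv1 hpi0 (by omega) hfuel2]
          exact pvCompress_inv placed ls _ _ (p + i) hInv1 hpi0 (by omega) hfuel2
        set nxt2 := (ufFind (ufFind nxt 0).2 (p + i)).2 with hnxt2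
        have hlen2 : nxt2.length = (max ls 0 + 1).toNat := hInv2.1
        have hInv' : pvInv (PySem.List.pySetD (PySem.List.pySetD nxt2 p (p + 1))
            (p + i) (p + i + 1)) placed' ls := by
          constructor
          · rw [PySem.List.pySetD_of_nonneg _ _ hpi0, PySem.List.pySetD_of_nonneg _ _
              (by omega : (0:Int) ≤ p), List.length_set, List.length_set]
            exact hlen2
          · intro j v h0j h1j hvj
            rw [pvGet_setD _ (p + i) j _ hpi0 h0j
              (by rw [PySem.List.pySetD_of_nonneg _ _ (by omega : (0:Int) ≤ p),
                List.length_set]; omega)] at hvj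
            by_cases hjpi : j = p + i
            · rw [if_pos hjpi] at hvj
              have hvv : v = p + i + 1 := by injection hvj; omega
              refine ⟨by omega, by omega, ?_, ?_, ?_⟩
              · intro m hm1 hm2
                have : m = p + i := by omega
                rw [hcontains', this]; simp
              · intro _ hcf
                rw [hcontains' j, hjpi] at hcf; simp at hcf
              · intro _ _; omega
            · rw [if_neg hjpi] at hvj
              rw [pvGet_setD nxt2 p j _ (by omega) h0j (by omega)] at hvj
              by_cases hjp : j = p
              · rw [if_pos hjp] at hvj
                have hvv : v = p + 1 := by injection hvj; omega
                refine ⟨by omega, by omega, ?_, ?_, ?_⟩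
                · intro m hm1 hm2
                  have : m = p := by omega
                  rw [hcontains', this]; simp
                · intro _ hcf
                  rw [hcontains' j, hjp] at hcf; simp at hcf
                · intro _ _; omega
              · rw [if_neg hjp] at hvj
                obtain ⟨ha, hb, hc, hd, he⟩ := hInv2.2 j v h0j h1j hvj
                refine ⟨ha, hb, ?_, ?_, ?_⟩
                · intro m hm1 hm2
                  rw [hcontains']
                  simp [hc m hm1 hm2]
                · intro hjm hcf
                  rw [hcontains' j] at hcf
                  simp only [Bool.or_eq_false_iff, beq_eq_false_iff_ne] at hcf
                  exact hd hjm hcf.2.2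
                · intro hjm hct
                  rw [hcontains' j] at hct
                  simp only [Bool.or_eq_true, beq_iff_eq] at hct
                  rcases hct with h | h | h
                  · exact absurd h hjpi
                  · exact absurd h hjp
                  · exact he hjm h
        rw [hrender]
        refine ih hrest placed' _ (p + 1) hInv' (by omega) (by omega) ?_
        intro m hm0 hm1
        rw [hcontains']
        by_cases hmp : m = p
        · simp [hmp]
        · by_cases hmpi : m = p + i
          · simp [hmpi]
          · have hmlt : m < p := by omega
            have hcm : placed.contains m = true := by
              by_cases h : ptr ≤ m
              · exact (pvAdv_prefix placed ls ptr m h (by omega)).2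
              · exact hpre m hm0 (by omega)
            simp [hcm]

-- the initial nxt array (the identity range) satisfies the invariant for the empty dict
lemma pvInv_init (ls : Int) :
    pvInv (PySem.List.pyRange 0 (max ls 0 + 1) 1) PySem.Dict.empty ls := by
  constructor
  · rw [PySem.List.length_pyRange_one]; congr 1; omega
  · intro j v h0 h1 hv
    have hj : j.toNat < (max ls 0 + 1 - 0).toNat := by omega
    rw [PySem.List.pyGet?_of_nonneg _ h0, List.getElem?_eq_getElem (by
      rw [PySem.List.length_pyRange_one]; omega)] at hv
    rw [PySem.List.getElem_pyRange_one] at hv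
    have hvv : v = j := by injection hv; omega
    refine ⟨by omega, by omega, by omega, fun _ _ => by omega, ?_⟩
    intro _ h
    rw [PySem.Dict.contains_empty] at h
    cases h

-- ===== VERDICT (by name: the statement is the Claim_ definition above) =====
theorem skolem_gen_spec : Claim_equal_skolem_gen := by
  intro numpair k _ hpre
  unfold Spec_skolem_gen
  show skolemA_loop (2 * k) (List.replicate (2 * k).toNat 0) 0 numpair =
    skolemB_loop (2 * k) (PySem.List.pyRange 0 (max (2 * k) 0 + 1) 1)
      (List.replicate (2 * k).toNat 0) numpair
  rw [← pvRender_empty (2 * k)]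
  rw [pv_a_loop_eq (2 * k) numpair hpre PySem.Dict.empty 0 le_rfl
    (by intro j hj _; rw [PySem.Dict.contains_empty] at hj; cases hj)]
  rw [pv_b_loop_eq (2 * k) numpair hpre PySem.Dict.empty _ 0 (pvInv_init (2 * k))
    le_rfl (by omega) (by intro m h1 h2; omega)]
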